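-- pv_equiv track=rewrite | github.com/kasi-x/animator_eval | src/etl/audit/cross_source_consensus.py | _resolve_tie_by_source_priority
-- ===== SOURCE A (Python) =====
-- def _resolve_tie_by_source_priority(
--     top_values: list[str],
--     source_value_map: dict[str, str | None],
-- ) -> str:
--     """Pick a value from equally-tied candidates using source priority ranking.
--
--     Priority order (descending): anilist > mal > bgm > ann > madb > keyframe >
--     seesaawiki > other sources (alphabetical fallback).
--     """
--     _PRIORITY = ["anilist", "mal", "bgm", "ann", "madb", "keyframe", "seesaawiki"]
--
--     top_set = set(top_values)
--     # Walk source priority order; return first value that is a top candidate.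
--     for preferred_source in _PRIORITY:
--         for src, val in source_value_map.items():
--             if src == preferred_source and val in top_set:
--                 return val
--
--     # Alphabetical fallback on sources
--     for src in sorted(source_value_map.keys()):
--         val = source_value_map[src]
--         if val in top_set:
--             return val  # type: ignore[return-value]
--
--     return top_values[0]
-- ===== SOURCE B (Python) =====
-- def _resolve_tie_by_source_priority(
--     top_values: list[str],
--     source_value_map: dict[str, str | None],
-- ) -> str:
--     """Single-pass keyed min-selection: each source gets the key
--     (priority index or 7, source name); among sources whose value is a
--     top candidate, pick the one with the smallest key."""
--     _PRIORITY = ["anilist", "mal", "bgm", "ann", "madb", "keyframe", "seesaawiki"]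
--     rank = {s: i for i, s in enumerate(_PRIORITY)}
--     top_set = set(top_values)
--     best_key = None
--     best_val = None
--     for src, val in source_value_map.items():
--         if val in top_set:
--             key = (rank.get(src, len(_PRIORITY)), src)
--             if best_key is None or key < best_key:
--                 best_key, best_val = key, val
--     if best_key is not None:
--         return best_val
--     return top_values[0]
-- ===== Notes on version B (the rewrite author's own statement) =====
-- stated objective: simpler
-- what changed: Replaces A's two-phase selection (a scan of the map per priority source, then a sort of the keys plus a second scan for the alphabetical fallback) by a single pass over the map that keeps the qualifying entry with the minimum (priority-rank, source-name) key.
import Mathlib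
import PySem

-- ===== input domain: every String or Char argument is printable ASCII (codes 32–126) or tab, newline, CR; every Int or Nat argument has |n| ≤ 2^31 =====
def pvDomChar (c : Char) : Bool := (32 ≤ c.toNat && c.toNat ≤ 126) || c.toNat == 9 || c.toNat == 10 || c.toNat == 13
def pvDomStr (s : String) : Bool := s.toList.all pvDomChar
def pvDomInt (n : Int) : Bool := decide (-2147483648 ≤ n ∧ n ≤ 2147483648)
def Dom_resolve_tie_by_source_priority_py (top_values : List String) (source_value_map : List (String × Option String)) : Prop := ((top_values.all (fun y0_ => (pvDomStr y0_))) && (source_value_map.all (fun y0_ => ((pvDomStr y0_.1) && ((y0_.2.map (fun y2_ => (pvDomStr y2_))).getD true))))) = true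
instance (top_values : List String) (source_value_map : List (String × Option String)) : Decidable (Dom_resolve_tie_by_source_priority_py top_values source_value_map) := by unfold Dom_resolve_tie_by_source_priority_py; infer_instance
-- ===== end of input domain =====

-- B replaces A's two-phase priority scan + alphabetical-sort fallback by one pass keeping the
-- qualifying entry with the minimum (priority-rank, source-name) key; equal return values on Pre_.

-- ===== PORT A =====
def pvPriority : List String := ["anilist", "mal", "bgm", "ann", "madb", "keyframe", "seesaawiki"]

-- `val in top_set` where val : str | None (None is never in a set of strings)
def pvQual (topSet : PySem.Set String) (val : Option String) : Bool :=
  match val with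
  | some v => PySem.Set.contains topSet v
  | none => false

-- inner loop of A's first phase: first item with src == preferred whose value is a top candidate
def pvFindPreferred (topSet : PySem.Set String) (p : String) : List (String × Option String) → Option String
  | [] => none
  | (src, val) :: rest =>
      if src == p && pvQual topSet val then val else pvFindPreferred topSet p rest

-- outer loop of A's first phase over _PRIORITY
def pvPhase1 (topSet : PySem.Set String) (items : List (String × Option String)) : List String → Option String
  | [] => none
  | p :: ps =>
      match pvFindPreferred topSet p items with
      | some v => some v
      | none => pvPhase1 topSet items ps

-- A's alphabetical fallback: for src in sorted(keys): val = source_value_map[src]; if val in top_set: return val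
-- (`source_value_map[src]` via Dict.get?; src always comes from the keys, so the getD none default is never used)
def pvPhase2 (topSet : PySem.Set String) (d : PySem.Dict String (Option String)) : List String → Option String
  | [] => none
  | k :: ks =>
      let val := (d.get? k).getD none
      if pvQual topSet val then val else pvPhase2 topSet d ks

def resolve_tie_by_source_priority_py (top_values : List String) (source_value_map : List (String × Option String)) : String :=
  let topSet := PySem.Set.ofList top_values
  match pvPhase1 topSet source_value_map pvPriority with
  | some v => v
  | none =>
      match pvPhase2 topSet ⟨source_value_map⟩
          (PySem.List.sorted (source_value_map.map Prod.fst) (fun s => s)) with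
      | some v => v
      | none => PySem.List.pyGetD top_values 0 ""   -- top_values[0]; in range under Pre_

-- ===== PORT B =====
-- rank = {s: i for i, s in enumerate(_PRIORITY)}
def pvRankTable : PySem.Dict String Nat := PySem.Dict.ofList pvPriority.zipIdx

-- rank.get(src, len(_PRIORITY))
def pvRank (src : String) : Nat := pvRankTable.getD src pvPriority.length

-- tuple comparison (rank, name) < (rank, name)
def pvKeyLt (a b : Nat × String) : Bool := a.1 < b.1 || (a.1 == b.1 && a.2 < b.2)

-- B's single loop: best (key, value) among qualifying entries
def pvBestLoop (topSet : PySem.Set String) :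
    List (String × Option String) → Option ((Nat × String) × String) → Option ((Nat × String) × String)
  | [], best => best
  | (src, val) :: rest, best =>
      match val with
      | some v =>
          if PySem.Set.contains topSet v then
            match best with
            | none => pvBestLoop topSet rest (some ((pvRank src, src), v))
            | some (bk, bv) =>
                if pvKeyLt (pvRank src, src) bk then pvBestLoop topSet rest (some ((pvRank src, src), v))
                else pvBestLoop topSet rest (some (bk, bv))
          else pvBestLoop topSet rest best
      | none => pvBestLoop topSet rest best

def resolve_tie_by_source_priority_py_alt (top_values : List String) (source_value_map : List (String × Option String)) : String :=
  let topSet := PySem.Set.ofList top_values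
  match pvBestLoop topSet source_value_map none with
  | some (_, v) => v
  | none => PySem.List.pyGetD top_values 0 ""   -- top_values[0]; in range under Pre_

-- ===== PRECONDITION & SPEC =====
-- Pre_ excludes (i) empty top_values, on which A (and B) raise IndexError at top_values[0], and
-- (ii) association lists with duplicate source keys, which do not represent any Python dict
-- (the dict invariant of the List (String × Option String) encoding; no dict input is lost).
def Pre_resolve_tie_by_source_priority_py (top_values : List String) (source_value_map : List (String × Option String)) : Prop :=
  top_values ≠ [] ∧ (source_value_map.map Prod.fst).Nodup
instance (top_values : List String) (source_value_map : List (String × Option String)) : Decidable (Pre_resolve_tie_by_source_priority_py top_values source_value_map) := by unfold Pre_resolve_tie_by_source_priority_py; infer_instance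

def pvWitness_resolve_tie_by_source_priority_py : List String × (List (String × Option String)) :=
  (["x", "y"], [("wiki", some "y"), ("mal", some "x"), ("bgm", none)])

def Spec_resolve_tie_by_source_priority_py (top_values : List String) (source_value_map : List (String × Option String)) (out : String) : Prop := out = resolve_tie_by_source_priority_py_alt top_values source_value_map
instance (top_values : List String) (source_value_map : List (String × Option String)) (out : String) : Decidable (Spec_resolve_tie_by_source_priority_py top_values source_value_map out) := by unfold Spec_resolve_tie_by_source_priority_py; infer_instance

-- ===== CLAIM (what is proved, stated in full; the proofs are below) =====
def Claim_equal_resolve_tie_by_source_priority_py : Prop := ∀ (top_values : List String) (source_value_map : List (String × Option String)), Dom_resolve_tie_by_source_priority_py top_values source_value_map → Pre_resolve_tie_by_source_priority_py top_values source_value_map → Spec_resolve_tie_by_source_priority_py top_values source_value_map (resolve_tie_by_source_priority_py top_values source_value_map)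

-- ===== LEMMAS AND PROOFS =====

-- proof-side abbreviation for B's selection key
def pvKey (src : String) : Nat × String := (pvRank src, src)

-- left-biased minimum of two optional (key, value) candidates
def pvMerge : Option ((Nat × String) × String) → Option ((Nat × String) × String) → Option ((Nat × String) × String)
  | none, b => b
  | some a, none => some a
  | some a, some b => if pvKeyLt b.1 a.1 then some b else some a

-- structural characterisation of B's loop result: leftmost minimum over qualifying entries
def pvMinQ (ts : PySem.Set String) : List (String × Option String) → Option ((Nat × String) × String)
  | [] => none
  | (src, val) :: rest =>
      match val with
      | some v =>
          if PySem.Set.contains ts v then pvMerge (some (pvKey src, v)) (pvMinQ ts rest)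
          else pvMinQ ts rest
      | none => pvMinQ ts rest

lemma pvKeyLt_irrefl (a : Nat × String) : pvKeyLt a a = false := by
  simp [pvKeyLt]

lemma pvKeyLt_trans {a b c : Nat × String} (h1 : pvKeyLt a b = true) (h2 : pvKeyLt b c = true) :
    pvKeyLt a c = true := by
  simp only [pvKeyLt, Bool.or_eq_true, Bool.and_eq_true, decide_eq_true_eq, beq_iff_eq] at *
  rcases h1 with h1 | ⟨e1, s1⟩ <;> rcases h2 with h2 | ⟨e2, s2⟩
  · exact Or.inl (lt_trans h1 h2)
  · exact Or.inl (e2 ▸ h1)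
  · exact Or.inl (e1 ▸ h2)
  · exact Or.inr ⟨e1.trans e2, lt_trans s1 s2⟩

lemma pvKeyLt_cotrans {a c : Nat × String} (b : Nat × String) (h : pvKeyLt a c = true) :
    pvKeyLt a b = true ∨ pvKeyLt b c = true := by
  simp only [pvKeyLt, Bool.or_eq_true, Bool.and_eq_true, decide_eq_true_eq, beq_iff_eq] at *
  rcases h with h | ⟨e, s⟩
  · rcases lt_or_ge a.1 b.1 with h' | h'
    · exact Or.inl (Or.inl h')
    · exact Or.inr (Or.inl (lt_of_le_of_lt h' h))
  · rcases lt_trichotomy a.1 b.1 with h' | h' | h'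
    · exact Or.inl (Or.inl h')
    · rcases lt_or_ge a.2 b.2 with s' | s'
      · exact Or.inl (Or.inr ⟨h', s'⟩)
      · exact Or.inr (Or.inr ⟨h' ▸ e, lt_of_le_of_lt s' s⟩)
    · exact Or.inr (Or.inl (e ▸ h'))

lemma pvMerge_none_right (a : Option ((Nat × String) × String)) : pvMerge a none = a := by
  cases a <;> rfl

lemma pvMerge_assoc (a b c : Option ((Nat × String) × String)) :
    pvMerge (pvMerge a b) c = pvMerge a (pvMerge b c) := by
  cases a with
  | none => simp [pvMerge]
  | some x =>
    cases b with
    | none => simp [pvMerge]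
    | some y =>
      cases c with
      | none => simp [pvMerge_none_right]
      | some z =>
        by_cases p : pvKeyLt y.1 x.1 = true <;> by_cases q : pvKeyLt z.1 y.1 = true
        · simp [pvMerge, p, q, pvKeyLt_trans q p]
        · simp [pvMerge, p, q]
        · simp [pvMerge, p, q]
        · have hr : pvKeyLt z.1 x.1 = false := by
            by_contra hc
            have hzx : pvKeyLt z.1 x.1 = true := by revert hc; cases pvKeyLt z.1 x.1 <;> simp
            rcases pvKeyLt_cotrans y.1 hzx with h | h
            · exact q h
            · exact p h
          simp [pvMerge, p, q, hr]

lemma pvBestLoop_eq (ts : PySem.Set String) (l : List (String × Option String))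
    (acc : Option ((Nat × String) × String)) :
    pvBestLoop ts l acc = pvMerge acc (pvMinQ ts l) := by
  induction l generalizing acc with
  | nil => cases acc <;> simp [pvBestLoop, pvMinQ, pvMerge]
  | cons kv rest ih =>
    obtain ⟨src, val⟩ := kv
    cases val with
    | none => simpa [pvBestLoop, pvMinQ] using ih acc
    | some v =>
      by_cases hc : v ∈ ts
      · have hc' : PySem.Set.contains ts v = true := by
          simpa [PySem.Set.contains, List.contains_iff_mem] using hc
        have hstep : pvBestLoop ts ((src, some v) :: rest) acc
            = pvBestLoop ts rest (pvMerge acc (some (pvKey src, v))) := by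
          cases acc with
          | none => simp [pvBestLoop, pvMerge, hc', hc, pvKey]
          | some b =>
            obtain ⟨bk, bv⟩ := b
            by_cases hlt : pvKeyLt (pvRank src, src) bk = true
            · simp [pvBestLoop, pvMerge, hc', hc, hlt, pvKey]
            · simp [pvBestLoop, pvMerge, hc', hc, hlt, pvKey]
        rw [hstep, ih, pvMerge_assoc]
        simp [pvMinQ, hc', hc]
      · have hc' : PySem.Set.contains ts v = false := by
          simpa [PySem.Set.contains, List.contains_iff_mem] using hc
        simpa [pvBestLoop, pvMinQ, hc', hc] using ih acc

lemma pvMinQ_none (ts : PySem.Set String) (sm : List (String × Option String))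
    (h : pvMinQ ts sm = none) : ∀ kv ∈ sm, pvQual ts kv.2 = false := by
  induction sm with
  | nil => intro kv hkv; cases hkv
  | cons kv0 rest ih =>
    obtain ⟨src, val⟩ := kv0
    intro kv hkv
    cases val with
    | none =>
      rcases List.mem_cons.mp hkv with h0 | hkv
      · simp [h0, pvQual]
      · exact ih (by simpa [pvMinQ] using h) kv hkv
    | some v =>
      by_cases hc : v ∈ ts
      · exfalso
        have hc' : PySem.Set.contains ts v = true := by
          simpa [PySem.Set.contains, List.contains_iff_mem] using hc
        rw [pvMinQ, hc'] at h
        simp only [reduceIte] at h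
        cases hrest : pvMinQ ts rest <;> simp [pvMerge, hrest] at h
        split at h <;> simp at h
      · rcases List.mem_cons.mp hkv with h0 | hkv
        · have hc' : PySem.Set.contains ts v = false := by
            simpa [PySem.Set.contains, List.contains_iff_mem] using hc
          simp [h0, pvQual, hc', hc]
        · refine ih ?_ kv hkv
          have hc' : PySem.Set.contains ts v = false := by
            simpa [PySem.Set.contains, List.contains_iff_mem] using hc
          rw [pvMinQ, hc'] at h
          simpa using h

lemma pvMinQ_some (ts : PySem.Set String) (sm : List (String × Option String))
    (k : Nat × String) (v : String) (h : pvMinQ ts sm = some (k, v)) :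
    (k.2, some v) ∈ sm ∧ k = pvKey k.2 ∧ PySem.Set.contains ts v = true ∧
      ∀ src w, (src, some w) ∈ sm → PySem.Set.contains ts w = true →
        pvKeyLt (pvKey src) k = false := by
  induction sm generalizing k v with
  | nil => simp [pvMinQ] at h
  | cons kv0 rest ih =>
    obtain ⟨src0, val0⟩ := kv0
    cases val0 with
    | none =>
      rw [pvMinQ] at h
      obtain ⟨hmem, hk, hq, hmin⟩ := ih k v h
      refine ⟨List.mem_cons_of_mem _ hmem, hk, hq, ?_⟩
      intro src w hsw hcw
      rcases List.mem_cons.mp hsw with h0 | hsw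
      · cases h0
      · exact hmin src w hsw hcw
    | some v0 =>
      by_cases hc : v0 ∈ ts
      · have hc' : PySem.Set.contains ts v0 = true := by
          simpa [PySem.Set.contains, List.contains_iff_mem] using hc
        rw [pvMinQ, hc'] at h
        simp only [reduceIte] at h
        cases hrest : pvMinQ ts rest with
        | none =>
          rw [hrest] at h
          simp only [pvMerge] at h
          injection h with h'
          injection h' with ha hb
          cases ha; cases hb
          refine ⟨by simp [pvKey], by simp [pvKey], hc', ?_⟩
          intro src w hsw hcw
          rcases List.mem_cons.mp hsw with h0 | hsw
          · have hs : src = src0 := by injection h0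
            rw [hs, pvKeyLt_irrefl]
          · exfalso
            have hqf := pvMinQ_none ts rest hrest (src, some w) hsw
            simp only [pvQual] at hqf
            rw [hcw] at hqf; cases hqf
        | some b =>
          obtain ⟨k', v'⟩ := b
          rw [hrest] at h
          simp only [pvMerge] at h
          by_cases hlt : pvKeyLt k' (pvKey src0) = true
          · rw [if_pos hlt] at h
            injection h with h'
            injection h' with ha hb
            cases ha; cases hb
            obtain ⟨hmem, hk, hq, hmin⟩ := ih k v hrest
            refine ⟨List.mem_cons_of_mem _ hmem, hk, hq, ?_⟩
            intro src w hsw hcw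
            rcases List.mem_cons.mp hsw with h0 | hsw
            · have hs0 : src = src0 := by injection h0
              by_contra hcc
              have h1 : pvKeyLt (pvKey src) k = true := by
                revert hcc; cases pvKeyLt (pvKey src) k <;> simp
              rw [hs0] at h1
              have h2 := pvKeyLt_trans h1 hlt
              simp [pvKeyLt_irrefl] at h2
            · exact hmin src w hsw hcw
          · rw [if_neg hlt] at h
            injection h with h'
            injection h' with ha hb
            cases ha; cases hb
            obtain ⟨hmem', hk', hq', hmin'⟩ := ih k' v' hrest
            refine ⟨by simp [pvKey], by simp [pvKey], hc', ?_⟩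
            intro src w hsw hcw
            rcases List.mem_cons.mp hsw with h0 | hsw
            · have hs : src = src0 := by injection h0
              rw [hs, pvKeyLt_irrefl]
            · by_contra hcc
              have h1 : pvKeyLt (pvKey src) (pvKey src0) = true := by
                revert hcc; cases pvKeyLt (pvKey src) (pvKey src0) <;> simp
              rcases pvKeyLt_cotrans k' h1 with h2 | h2
              · have := hmin' src w hsw hcw
                rw [this] at h2; cases h2
              · exact hlt h2
      · have hc' : PySem.Set.contains ts v0 = false := by
          simpa [PySem.Set.contains, List.contains_iff_mem] using hc
        rw [pvMinQ, hc'] at h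
        simp at h
        obtain ⟨hmem, hk, hq, hmin⟩ := ih k v h
        refine ⟨List.mem_cons_of_mem _ hmem, hk, hq, ?_⟩
        intro src w hsw hcw
        rcases List.mem_cons.mp hsw with h0 | hsw
        · exfalso
          have hw : w = v0 := by injection h0 with _ h2; injection h2
          rw [hw] at hcw; rw [hcw] at hc'; cases hc'
        · exact hmin src w hsw hcw

lemma pvRank_eq (s : String) : pvRank s =
    if s = "anilist" then 0 else if s = "mal" then 1 else if s = "bgm" then 2
    else if s = "ann" then 3 else if s = "madb" then 4 else if s = "keyframe" then 5
    else if s = "seesaawiki" then 6 else 7 := by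
  by_cases h1 : s = "anilist"
  · subst h1; decide
  by_cases h2 : s = "mal"
  · subst h2; decide
  by_cases h3 : s = "bgm"
  · subst h3; decide
  by_cases h4 : s = "ann"
  · subst h4; decide
  by_cases h5 : s = "madb"
  · subst h5; decide
  by_cases h6 : s = "keyframe"
  · subst h6; decide
  by_cases h7 : s = "seesaawiki"
  · subst h7; decide
  rw [if_neg h1, if_neg h2, if_neg h3, if_neg h4, if_neg h5, if_neg h6, if_neg h7]
  have ht : pvRankTable = ⟨[("anilist", 0), ("mal", 1), ("bgm", 2), ("ann", 3),
      ("madb", 4), ("keyframe", 5), ("seesaawiki", 6)]⟩ := by decide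
  simp only [pvRank, PySem.Dict.getD, PySem.Dict.get?, ht, List.find?]
  simp [beq_eq_false_iff_ne.mpr (fun hh => h1 hh.symm),
        beq_eq_false_iff_ne.mpr (fun hh => h2 hh.symm),
        beq_eq_false_iff_ne.mpr (fun hh => h3 hh.symm),
        beq_eq_false_iff_ne.mpr (fun hh => h4 hh.symm),
        beq_eq_false_iff_ne.mpr (fun hh => h5 hh.symm),
        beq_eq_false_iff_ne.mpr (fun hh => h6 hh.symm),
        beq_eq_false_iff_ne.mpr (fun hh => h7 hh.symm)]
  decide

lemma pvRank_le (s : String) : pvRank s ≤ 7 := by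
  rw [pvRank_eq]; split_ifs <;> omega

lemma pvFindPreferred_none (ts : PySem.Set String) (p : String) (sm : List (String × Option String))
    (h : ∀ val, (p, val) ∈ sm → pvQual ts val = false) : pvFindPreferred ts p sm = none := by
  induction sm with
  | nil => rfl
  | cons kv rest ih =>
    obtain ⟨src, val⟩ := kv
    rw [pvFindPreferred]
    by_cases hsp : src = p
    · subst hsp
      have := h val (List.mem_cons_self)
      simp [this]
      exact ih (fun val hval => h val (List.mem_cons_of_mem _ hval))
    · have : (src == p) = false := by simp [hsp]
      simp [this]
      exact ih (fun val hval => h val (List.mem_cons_of_mem _ hval))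

lemma pvFindPreferred_some {v : String} (ts : PySem.Set String) (p : String)
    (sm : List (String × Option String))
    (hnd : (sm.map Prod.fst).Nodup) (hm : (p, some v) ∈ sm)
    (hq : PySem.Set.contains ts v = true) :
    pvFindPreferred ts p sm = some v := by
  induction sm with
  | nil => cases hm
  | cons kv rest ih =>
    obtain ⟨src, val⟩ := kv
    rw [List.map_cons, List.nodup_cons] at hnd
    rw [pvFindPreferred]
    rcases List.mem_cons.mp hm with h0 | hm
    · have hsp : src = p := by injection h0 with h1 _; exact h1.symm
      have hval : val = some v := by injection h0 with _ h2; exact h2.symm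
      subst hsp; subst hval
      have hqv : v ∈ ts := by simpa [PySem.Set.contains, List.contains_iff_mem] using hq
      simp [pvQual, hq, hqv]
    · have hsp : src ≠ p := by
        intro hc; subst hc
        have hx : src ∈ rest.map Prod.fst := List.mem_map_of_mem (f := Prod.fst) hm
        exact hnd.1 hx
      have hbe : (src == p) = false := by simp [hsp]
      simp only [hbe, Bool.false_and, Bool.false_eq_true, if_false]
      exact ih hnd.2 hm

lemma pvPhase1_none (ts : PySem.Set String) (sm : List (String × Option String)) (ps : List String)
    (h : ∀ p ∈ ps, pvFindPreferred ts p sm = none) : pvPhase1 ts sm ps = none := by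
  induction ps with
  | nil => rfl
  | cons p ps ih =>
    rw [pvPhase1, h p List.mem_cons_self]
    exact ih (fun q hq => h q (List.mem_cons_of_mem _ hq))

lemma pvPhase1_first {v : String} (ts : PySem.Set String) (sm : List (String × Option String))
    (ps1 ps2 : List String) (p : String)
    (h1 : ∀ q ∈ ps1, pvFindPreferred ts q sm = none) (h2 : pvFindPreferred ts p sm = some v) :
    pvPhase1 ts sm (ps1 ++ p :: ps2) = some v := by
  induction ps1 with
  | nil => rw [List.nil_append, pvPhase1, h2]
  | cons q qs ih =>
    rw [List.cons_append, pvPhase1, h1 q List.mem_cons_self]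
    exact ih (fun r hr => h1 r (List.mem_cons_of_mem _ hr))

lemma pvLookup_some (sm : List (String × Option String)) (hnd : (sm.map Prod.fst).Nodup)
    (p : String) (val : Option String) (hm : (p, val) ∈ sm) :
    (PySem.Dict.get? (⟨sm⟩ : PySem.Dict String (Option String)) p) = some val := by
  induction sm with
  | nil => cases hm
  | cons kv rest ih =>
    obtain ⟨src, val0⟩ := kv
    rw [List.map_cons, List.nodup_cons] at hnd
    rcases List.mem_cons.mp hm with h0 | hm
    · have hsp : src = p := by injection h0 with h1 _; exact h1.symm
      have hval : val0 = val := by injection h0 with _ h2; exact h2.symm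
      subst hsp; subst hval
      simp [PySem.Dict.get?, List.find?]
    · have hsp : src ≠ p := by
        intro hc; subst hc
        have hx : src ∈ rest.map Prod.fst := List.mem_map_of_mem (f := Prod.fst) hm
        exact hnd.1 hx
      have hbe : (src == p) = false := by simp [hsp]
      have := ih hnd.2 hm
      simpa [PySem.Dict.get?, List.find?, hbe] using this

lemma pvGet?_mem (sm : List (String × Option String)) (q : String) (val : Option String)
    (h : PySem.Dict.get? (⟨sm⟩ : PySem.Dict String (Option String)) q = some val) :
    (q, val) ∈ sm := by
  simp only [PySem.Dict.get?, Option.map_eq_some_iff] at h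
  obtain ⟨pr, hfind, hval⟩ := h
  have hmem : pr ∈ sm := List.mem_of_find?_eq_some hfind
  have hpred := List.find?_some hfind
  have hq : pr.1 = q := by simpa [beq_iff_eq] using hpred
  have : pr = (q, val) := by
    obtain ⟨a, b⟩ := pr
    simp at hq hval
    rw [hq, hval]
  rwa [this] at hmem

lemma pvPhase2_none (ts : PySem.Set String) (sm : List (String × Option String)) (ks : List String)
    (h : ∀ kv ∈ sm, pvQual ts kv.2 = false) : pvPhase2 ts ⟨sm⟩ ks = none := by
  induction ks with
  | nil => rfl
  | cons k ks ih =>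
    rw [pvPhase2]
    have hqf : pvQual ts ((PySem.Dict.get? (⟨sm⟩ : PySem.Dict String (Option String)) k).getD none) = false := by
      cases hget : PySem.Dict.get? (⟨sm⟩ : PySem.Dict String (Option String)) k with
      | none => simp [pvQual]
      | some val => simpa using h (k, val) (pvGet?_mem sm k val hget)
    simp only [hqf, if_false]
    exact ih

lemma pvPhase2_first (ts : PySem.Set String) (sm : List (String × Option String))
    (ks1 ks2 : List String) (p : String)
    (h1 : ∀ q ∈ ks1, pvQual ts ((PySem.Dict.get? (⟨sm⟩ : PySem.Dict String (Option String)) q).getD none) = false)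
    (h2 : pvQual ts ((PySem.Dict.get? (⟨sm⟩ : PySem.Dict String (Option String)) p).getD none) = true) :
    pvPhase2 ts ⟨sm⟩ (ks1 ++ p :: ks2) = (PySem.Dict.get? (⟨sm⟩ : PySem.Dict String (Option String)) p).getD none := by
  induction ks1 with
  | nil => rw [List.nil_append, pvPhase2]; simp [h2]
  | cons q qs ih =>
    rw [List.cons_append, pvPhase2]
    simp only [h1 q List.mem_cons_self, if_false]
    exact ih (fun r hr => h1 r (List.mem_cons_of_mem _ hr))

-- A returns the min-key value when its source sits in the priority list
lemma pvAfix (ts : PySem.Set String) (sm : List (String × Option String))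
    (hnd : (sm.map Prod.fst).Nodup) (src0 v : String)
    (hm : (src0, some v) ∈ sm) (hq : PySem.Set.contains ts v = true)
    (hminp : ∀ src w, (src, some w) ∈ sm → PySem.Set.contains ts w = true →
      pvKeyLt (pvKey src) (pvKey src0) = false)
    (ps1 ps2 : List String) (hdec : pvPriority = ps1 ++ src0 :: ps2)
    (hpref : ∀ q ∈ ps1, pvKeyLt (pvKey q) (pvKey src0) = true) :
    pvPhase1 ts sm pvPriority = some v := by
  rw [hdec]
  apply pvPhase1_first
  · intro q hqmem
    apply pvFindPreferred_none
    intro val hval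
    cases val with
    | none => rfl
    | some w =>
      by_cases hcw : PySem.Set.contains ts w = true
      · have := hminp q w hval hcw
        rw [hpref q hqmem] at this; cases this
      · simp only [pvQual]
        revert hcw; cases PySem.Set.contains ts w <;> simp
  · exact pvFindPreferred_some ts src0 sm hnd hm hq

-- ===== VERDICT (by name: the statement is the Claim_ definition above) =====
theorem resolve_tie_by_source_priority_py_spec : Claim_equal_resolve_tie_by_source_priority_py := by
  intro tv sm _hdom hpre
  obtain ⟨-, hnd⟩ := hpre
  unfold Spec_resolve_tie_by_source_priority_py
  unfold resolve_tie_by_source_priority_py resolve_tie_by_source_priority_py_alt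
  set ts := PySem.Set.ofList tv with hts
  cases hmin : pvMinQ ts sm with
  | none =>
    have hqall := pvMinQ_none ts sm hmin
    have hA1 : pvPhase1 ts sm pvPriority = none :=
      pvPhase1_none ts sm pvPriority (fun p _ =>
        pvFindPreferred_none ts p sm (fun val hval => hqall (p, val) hval))
    have hA2 : pvPhase2 ts ⟨sm⟩ (PySem.List.sorted (sm.map Prod.fst) (fun s => s)) = none :=
      pvPhase2_none ts sm _ hqall
    have hB : pvBestLoop ts sm none = none := by rw [pvBestLoop_eq, hmin]; rfl
    simp [hA1, hA2, hB]
  | some kv =>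
    obtain ⟨k, v⟩ := kv
    have hB : pvBestLoop ts sm none = some (k, v) := by rw [pvBestLoop_eq, hmin]; rfl
    obtain ⟨hm, hk, hq, hminp⟩ := pvMinQ_some ts sm k v hmin
    set src0 := k.2 with hsrc0
    have hminp' : ∀ src w, (src, some w) ∈ sm → PySem.Set.contains ts w = true →
        pvKeyLt (pvKey src) (pvKey src0) = false := by
      intro src w hsw hcw
      have := hminp src w hsw hcw
      rwa [hk] at this
    by_cases h7 : pvRank src0 < 7
    · -- priority source: phase 1 returns v
      have hre := pvRank_eq src0
      have hA1 : pvPhase1 ts sm pvPriority = some v := by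
        split_ifs at hre with e1 e2 e3 e4 e5 e6 e7
        · exact pvAfix ts sm hnd src0 v hm hq hminp' [] _ (by rw [e1]; rfl) (by intro q hq; cases hq)
        · exact pvAfix ts sm hnd src0 v hm hq hminp' ["anilist"] _ (by rw [e2]; rfl)
            (by intro q hqm; rw [e2]; fin_cases hqm <;> decide)
        · exact pvAfix ts sm hnd src0 v hm hq hminp' ["anilist", "mal"] _ (by rw [e3]; rfl)
            (by intro q hqm; rw [e3]; fin_cases hqm <;> decide)
        · exact pvAfix ts sm hnd src0 v hm hq hminp' ["anilist", "mal", "bgm"] _ (by rw [e4]; rfl)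
            (by intro q hqm; rw [e4]; fin_cases hqm <;> decide)
        · exact pvAfix ts sm hnd src0 v hm hq hminp' ["anilist", "mal", "bgm", "ann"] _ (by rw [e5]; rfl)
            (by intro q hqm; rw [e5]; fin_cases hqm <;> decide)
        · exact pvAfix ts sm hnd src0 v hm hq hminp' ["anilist", "mal", "bgm", "ann", "madb"] _ (by rw [e6]; rfl)
            (by intro q hqm; rw [e6]; fin_cases hqm <;> decide)
        · exact pvAfix ts sm hnd src0 v hm hq hminp' ["anilist", "mal", "bgm", "ann", "madb", "keyframe"] _ (by rw [e7]; rfl)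
            (by intro q hqm; rw [e7]; fin_cases hqm <;> decide)
        · omega
      simp [hA1, hB]
    · -- non-priority source: phase 1 empty, alphabetical fallback returns v
      have h7' : pvRank src0 = 7 := le_antisymm (pvRank_le src0) (le_of_not_gt (by omega))
      have hA1 : pvPhase1 ts sm pvPriority = none := by
        apply pvPhase1_none
        intro p hp
        apply pvFindPreferred_none
        intro val hval
        cases val with
        | none => rfl
        | some w =>
          by_cases hcw : PySem.Set.contains ts w = true
          · exfalso
            have hfalse := hminp' p w hval hcw
            have hrp : pvRank p < 7 := by
              simp only [pvPriority, List.mem_cons, List.not_mem_nil, or_false] at hp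
              rcases hp with rfl | rfl | rfl | rfl | rfl | rfl | rfl <;> decide
            have : pvKeyLt (pvKey p) (pvKey src0) = true := by
              simp only [pvKey, pvKeyLt, Bool.or_eq_true, decide_eq_true_eq]
              left; omega
            rw [this] at hfalse; cases hfalse
          · simp only [pvQual]
            revert hcw; cases PySem.Set.contains ts w <;> simp
      -- the sorted key list
      set sk := PySem.List.sorted (sm.map Prod.fst) (fun s => s) with hsk
      have hmemk : src0 ∈ sk := by
        rw [hsk, PySem.List.mem_sorted]
        exact List.mem_map_of_mem hm
      obtain ⟨ks1, ks2, hdec⟩ := List.append_of_mem hmemk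
      have hpw : sk.Pairwise (· ≤ ·) := by
        rw [hsk]; exact PySem.List.sorted_pairwise (sm.map Prod.fst) (fun s => s)
      have hndk : sk.Nodup := ((PySem.List.sorted_perm (sm.map Prod.fst) (fun s => s) false).nodup_iff).mpr hnd
      have hplt : sk.Pairwise (· < ·) := by
        have := hpw.and hndk
        exact this.imp (fun h => lt_of_le_of_ne h.1 h.2)
      have hlt1 : ∀ q ∈ ks1, q < src0 := by
        rw [hdec] at hplt
        intro q hqm
        exact ((List.pairwise_append.mp hplt).2.2 q hqm src0 List.mem_cons_self)
      have h1 : ∀ q ∈ ks1, pvQual ts ((PySem.Dict.get? (⟨sm⟩ : PySem.Dict String (Option String)) q).getD none) = false := by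
        intro q hqm
        cases hget : PySem.Dict.get? (⟨sm⟩ : PySem.Dict String (Option String)) q with
        | none => simp [pvQual]
        | some val =>
          cases val with
          | none => simp [pvQual]
          | some w =>
            by_cases hcw : PySem.Set.contains ts w = true
            · exfalso
              have hmemw := pvGet?_mem sm q (some w) hget
              have hfalse := hminp' q w hmemw hcw
              have : pvKeyLt (pvKey q) (pvKey src0) = true := by
                simp only [pvKey, pvKeyLt, Bool.or_eq_true, Bool.and_eq_true,
                  decide_eq_true_eq, beq_iff_eq, h7']
                have hle := pvRank_le q
                rcases lt_or_eq_of_le hle with h | h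
                · left; exact h
                · right; exact ⟨h, hlt1 q hqm⟩
              rw [this] at hfalse; cases hfalse
            · simp only [Option.getD_some, pvQual]
              revert hcw; cases PySem.Set.contains ts w <;> simp
      have hget0 : PySem.Dict.get? (⟨sm⟩ : PySem.Dict String (Option String)) src0 = some (some v) :=
        pvLookup_some sm hnd src0 (some v) hm
      have h2 : pvQual ts ((PySem.Dict.get? (⟨sm⟩ : PySem.Dict String (Option String)) src0).getD none) = true := by
        rw [hget0]; simpa [pvQual] using hq
      have hA2 : pvPhase2 ts ⟨sm⟩ sk = some v := by
        rw [hdec, pvPhase2_first ts sm ks1 ks2 src0 h1 h2, hget0]; rfl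
      simp [hA1, hA2, hB]
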